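-- pv_equiv track=rewrite | github.com/askalski/moz-related | mctest.py | get_right_lines
-- ===== SOURCE A (Python) =====
-- def get_right_lines(fle):
-- 	rl = []
-- 	right_line = ''
-- 	for line in fle:
-- 		if line[0] in [str(x) for x in range(0,10)]:
-- 			if len(right_line) > 0:
-- 				rl.append(right_line)
-- 			right_line = line
-- 		else:
-- 			right_line = right_line + line
-- 	rl.append(right_line)
-- 	return rl
-- ===== SOURCE B (Python) =====
-- def get_right_lines(fle):
-- 	groups = []
-- 	cur = ''
-- 	for line in reversed(list(fle)):
-- 		cur = line + cur
-- 		if line[0] in '0123456789':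
-- 			groups.append(cur)
-- 			cur = ''
-- 	groups.reverse()
-- 	if cur:
-- 		groups.insert(0, cur)
-- 	return groups
-- ===== Notes on version B (the rewrite author's own statement) =====
-- stated objective: alternative
-- what changed: B traverses the lines in reverse, prepending each line to the current chunk and closing a group whenever the line starts with a digit, instead of A's forward scan with an append-on-next-group-start accumulator; the leftover prefix chunk is prepended only if nonempty.
-- intended difference: On the empty input list A returns [''] (its unconditional final append emits a spurious empty group) while B returns [], the intended 'no groups' result for no lines. — e.g. on get_right_lines([]): A returns [""], B returns []
import Mathlib
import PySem

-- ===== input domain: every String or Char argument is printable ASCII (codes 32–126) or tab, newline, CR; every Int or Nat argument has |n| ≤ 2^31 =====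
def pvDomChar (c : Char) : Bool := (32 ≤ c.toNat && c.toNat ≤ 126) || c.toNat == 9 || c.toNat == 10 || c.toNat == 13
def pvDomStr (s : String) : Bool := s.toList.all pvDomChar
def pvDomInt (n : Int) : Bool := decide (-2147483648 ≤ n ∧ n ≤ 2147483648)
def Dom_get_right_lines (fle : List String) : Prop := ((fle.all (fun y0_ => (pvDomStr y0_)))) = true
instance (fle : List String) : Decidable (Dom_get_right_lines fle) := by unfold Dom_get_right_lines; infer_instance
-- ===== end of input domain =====

-- B re-groups the lines by a reverse traversal that closes a group at each digit-leading line
-- (alternative decomposition, same cost); equivalence is proved on inputs with no empty line,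
-- and on the empty input the intended [] is returned instead of A's [''] (see D_ below).

-- ===== PORT A =====
-- [str(x) for x in range(0,10)]
def pvDigitStrs : List String := (PySem.List.pyRange 0 10 1).map PySem.Int.toStr

-- one iteration of A's loop; state = (rl, right_line); line[0] via pyGet? (none = IndexError, excluded by Pre_)
def pvStepA (st : List String × String) (line : String) : List String × String :=
  if (((PySem.Str.pyGet? line 0).map String.singleton).getD "") ∈ pvDigitStrs then
    (if PySem.Str.len st.2 > 0 then st.1 ++ [st.2] else st.1, line)
  else
    (st.1, st.2 ++ line)

def get_right_lines (fle : List String) : List String :=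
  let st := fle.foldl pvStepA ([], "")
  st.1 ++ [st.2]

-- ===== PORT B =====
-- one iteration of B's loop; state = (groups, cur)
def pvStepB (st : List String × String) (line : String) : List String × String :=
  let cur := line ++ st.2
  if PySem.Str.isIn (((PySem.Str.pyGet? line 0).map String.singleton).getD "") "0123456789" then
    (st.1 ++ [cur], "")
  else
    (st.1, cur)

def get_right_lines_alt (fle : List String) : List String :=
  let st := fle.reverse.foldl pvStepB ([], "")
  let groups := st.1.reverse
  if st.2 ≠ "" then st.2 :: groups else groups

-- ===== PRECONDITION & SPEC =====
-- Pre_ excludes inputs containing an empty line: there both A and B raise IndexError on line[0].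
def Pre_get_right_lines (fle : List String) : Prop := ∀ l ∈ fle, l ≠ ""
instance (fle : List String) : Decidable (Pre_get_right_lines fle) := by unfold Pre_get_right_lines; infer_instance
def pvWitness_get_right_lines : List String := ["1a", "bb"]

-- On the empty input list A returns [''] (its unconditional final append emits a spurious empty
-- group) while B returns [], the intended 'no groups' result for no lines.
def D_get_right_lines (fle : List String) : Prop := fle = []
instance (fle : List String) : Decidable (D_get_right_lines fle) := by unfold D_get_right_lines; infer_instance

def Spec_get_right_lines (fle : List String) (out : List String) : Prop := ¬ D_get_right_lines fle → out = get_right_lines_alt fle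
instance (fle : List String) (out : List String) : Decidable (Spec_get_right_lines fle out) := by unfold Spec_get_right_lines; infer_instance

def pvDiffWitness_get_right_lines : List String := []
def pvDiffWitnessOut_get_right_lines : (List String) × (List String) := ([""], [])

-- ===== CLAIM (what is proved, stated in full; the proofs are below) =====
def Claim_unchanged_get_right_lines : Prop := ∀ (fle : List String), Dom_get_right_lines fle → Pre_get_right_lines fle → Spec_get_right_lines fle (get_right_lines fle)
def Claim_changed_get_right_lines : Prop := Dom_get_right_lines (pvDiffWitness_get_right_lines) ∧ Pre_get_right_lines (pvDiffWitness_get_right_lines) ∧ D_get_right_lines (pvDiffWitness_get_right_lines) ∧ get_right_lines (pvDiffWitness_get_right_lines) = pvDiffWitnessOut_get_right_lines.1 ∧ get_right_lines_alt (pvDiffWitness_get_right_lines) = pvDiffWitnessOut_get_right_lines.2 ∧ pvDiffWitnessOut_get_right_lines.1 ≠ pvDiffWitnessOut_get_right_lines.2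
def Claim_exact_get_right_lines : Prop := ∀ (fle : List String), Dom_get_right_lines fle → Pre_get_right_lines fle → D_get_right_lines fle → get_right_lines fle ≠ get_right_lines_alt fle

-- ===== LEMMAS AND PROOFS =====

theorem pv_toList_ne_nil {s : String} : s ≠ "" ↔ s.toList ≠ [] := by
  constructor
  · intro h hc; exact h (String.toList_inj.mp (by simp [hc]))
  · intro h hc; exact h (by simp [hc])

theorem pv_append_ne_empty_left {s t : String} (h : s ≠ "") : s ++ t ≠ "" := by
  rw [pv_toList_ne_nil] at h ⊢
  rw [String.toList_append]
  intro hc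
  exact h (List.append_eq_nil_iff.mp hc).1

theorem pv_singleton_infix {c : Char} {ds : List Char} : [c] <:+: ds ↔ c ∈ ds := by
  constructor
  · intro h; exact h.mem (List.mem_singleton_self c)
  · intro h
    obtain ⟨s, t, rfl⟩ := List.append_of_mem h
    exact ⟨s, t, by simp⟩

-- the two ports' digit tests agree on nonempty lines
theorem pv_test_eq {line : String} (h : line ≠ "") :
    ((((PySem.Str.pyGet? line 0).map String.singleton).getD "") ∈ pvDigitStrs)
    ↔ (PySem.Str.isIn (((PySem.Str.pyGet? line 0).map String.singleton).getD "") "0123456789" = true) := by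
  rw [pv_toList_ne_nil] at h
  obtain ⟨c, r, hcr⟩ := List.exists_cons_of_ne_nil h
  have hget : PySem.Str.pyGet? line 0 = some c := by
    simp [PySem.Str.pyGet?, hcr]
  rw [hget]
  have hinj : Function.Injective String.toList := fun a b hab => String.toList_inj.mp hab
  have hA : String.singleton c ∈ pvDigitStrs ↔ c ∈ "0123456789".toList := by
    refine Iff.trans (List.mem_map_of_injective hinj).symm ?_
    rw [String.toList_singleton,
      show pvDigitStrs.map String.toList
        = [['0'],['1'],['2'],['3'],['4'],['5'],['6'],['7'],['8'],['9']] from by decide,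
      show ("0123456789" : String).toList
        = ['0','1','2','3','4','5','6','7','8','9'] from by decide]
    simp
  have hB : PySem.Str.isIn (String.singleton c) "0123456789" = true ↔ c ∈ "0123456789".toList := by
    rw [PySem.Str.isIn_eq, PySem.Chars.isIn_iff_infix, String.toList_singleton,
      pv_singleton_infix]
  simp only [Option.map_some, Option.getD_some]
  rw [hA, hB]

-- A's len test is nonemptiness
theorem pv_len_pos {s : String} : (PySem.Str.len s > 0) ↔ s ≠ "" := by
  rw [PySem.Str.len_eq, pv_toList_ne_nil]
  cases s.toList <;> simp

theorem pv_stepA_pos {rl : List String} {a line : String}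
    (ht : (((PySem.Str.pyGet? line 0).map String.singleton).getD "") ∈ pvDigitStrs) :
    pvStepA (rl, a) line = (if PySem.Str.len a > 0 then rl ++ [a] else rl, line) := by
  simp only [pvStepA]
  rw [if_pos ht]

theorem pv_stepA_neg {rl : List String} {a line : String}
    (ht : ¬ ((((PySem.Str.pyGet? line 0).map String.singleton).getD "") ∈ pvDigitStrs)) :
    pvStepA (rl, a) line = (rl, a ++ line) := by
  simp only [pvStepA]
  rw [if_neg ht]

theorem pv_stepB_pos {g : List String} {c line : String}
    (ht : PySem.Str.isIn (((PySem.Str.pyGet? line 0).map String.singleton).getD "") "0123456789" = true) :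
    pvStepB (g, c) line = (g ++ [line ++ c], "") := by
  simp only [pvStepB]
  rw [if_pos ht]

theorem pv_stepB_neg {g : List String} {c line : String}
    (ht : ¬ PySem.Str.isIn (((PySem.Str.pyGet? line 0).map String.singleton).getD "") "0123456789" = true) :
    pvStepB (g, c) line = (g, line ++ c) := by
  simp only [pvStepB]
  rw [if_neg ht]

-- the central invariant: A's forward fold with pending accumulator a and emitted groups rl
-- equals rl ++ (B's backward fold finalized with prefix a)
theorem pv_key : ∀ (L : List String), (∀ l ∈ L, l ≠ "") → ∀ (a : String) (rl : List String),
    (let st := L.foldl pvStepA (rl, a); st.1 ++ [st.2])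
    = rl ++ (let st := L.foldr (fun l s => pvStepB s l) (([] : List String), "")
             if a ++ st.2 ≠ "" ∨ st.1 = [] then (a ++ st.2) :: st.1.reverse else st.1.reverse) := by
  intro L
  induction L with
  | nil => intro _ a rl; simp
  | cons l ls ih =>
    intro hne a rl
    have hl : l ≠ "" := hne l (List.mem_cons_self)
    have hls : ∀ x ∈ ls, x ≠ "" := fun x hx => hne x (List.mem_cons_of_mem l hx)
    simp only [List.foldl_cons, List.foldr_cons]
    rcases hst : ls.foldr (fun x s => pvStepB s x) (([] : List String), "") with ⟨g, c⟩
    by_cases ht : PySem.Str.isIn (((PySem.Str.pyGet? l 0).map String.singleton).getD "") "0123456789" = true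
    · -- digit-leading line: A flushes a (if nonempty), B closes the group l ++ c
      have htA : (((PySem.Str.pyGet? l 0).map String.singleton).getD "") ∈ pvDigitStrs :=
        (pv_test_eq hl).mpr ht
      rw [pv_stepA_pos htA, ih hls l (if PySem.Str.len a > 0 then rl ++ [a] else rl), hst,
        pv_stepB_pos ht]
      have hlc : l ++ c ≠ "" := pv_append_ne_empty_left hl
      simp only [hlc, ne_eq, not_false_iff, true_or, if_true, String.append_empty,
        List.reverse_append, List.reverse_cons, List.reverse_nil, List.nil_append]
      by_cases ha : a = ""
      · subst ha
        rw [if_neg (by simp), if_neg (by simp)]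
        simp
      · rw [if_pos (pv_len_pos.mpr ha), if_pos (Or.inl ha)]
        simp
    · -- non-digit line: both sides extend the pending chunk
      have htA : ¬ ((((PySem.Str.pyGet? l 0).map String.singleton).getD "") ∈ pvDigitStrs) :=
        fun hmem => ht ((pv_test_eq hl).mp hmem)
      rw [pv_stepA_neg htA, ih hls (a ++ l) rl, hst, pv_stepB_neg ht]
      simp only [← String.append_assoc]

-- after processing a nonempty list of nonempty lines, B's state is not (no groups, empty chunk)
theorem pv_state_ne : ∀ (l : String) (ls : List String), l ≠ "" →
    ((l :: ls).foldr (fun x s => pvStepB s x) (([] : List String), "")).2 = "" →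
    ((l :: ls).foldr (fun x s => pvStepB s x) (([] : List String), "")).1 ≠ [] := by
  intro l ls hl
  simp only [List.foldr_cons]
  rcases ls.foldr (fun x s => pvStepB s x) (([] : List String), "") with ⟨g, c⟩
  by_cases ht : PySem.Str.isIn (((PySem.Str.pyGet? l 0).map String.singleton).getD "") "0123456789" = true
  · rw [pv_stepB_pos ht]; simp
  · rw [pv_stepB_neg ht]
    intro hc
    exact absurd hc (pv_append_ne_empty_left hl)

-- ===== VERDICT (by name: the statement is the Claim_ definition above) =====
theorem get_right_lines_spec : Claim_unchanged_get_right_lines := by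
  intro fle _ hpre hD
  unfold D_get_right_lines at hD
  have hkey := pv_key fle hpre "" []
  simp only [List.nil_append] at hkey
  rw [show get_right_lines fle = (let st := fle.foldl pvStepA ([], ""); st.1 ++ [st.2]) from rfl,
    hkey]
  rw [show get_right_lines_alt fle =
      (let st := fle.foldr (fun l s => pvStepB s l) (([] : List String), "")
       if st.2 ≠ "" then st.2 :: st.1.reverse else st.1.reverse) by
    simp only [get_right_lines_alt, List.foldl_reverse]]
  rcases fle with _ | ⟨l, ls⟩
  · exact absurd rfl hD
  · have hl : l ≠ "" := hpre l (List.mem_cons_self)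
    have hne := pv_state_ne l ls hl
    simp only
    rcases hst : (l :: ls).foldr (fun x s => pvStepB s x) (([] : List String), "") with ⟨g, c⟩
    rw [hst] at hne
    simp only [String.empty_append]
    by_cases hc : c = ""
    · have hg : g ≠ [] := hne hc
      subst hc
      simp [hg]
    · simp [hc]

theorem get_right_lines_changed : Claim_changed_get_right_lines := by
  unfold Claim_changed_get_right_lines; decide

theorem get_right_lines_tight : Claim_exact_get_right_lines := by
  intro fle _ _ hD
  unfold D_get_right_lines at hD
  subst hD
  decide
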